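-- pv_equiv track=rewrite | github.com/DoanTrungHuy/practice-interview-code | 2606-find-the-substring-with-maximum-cost/2606-find-the-substring-with-maximum-cost.py | maximumCostSubstring
-- ===== SOURCE A (Python) =====
-- from typing import List
--
-- def maximumCostSubstring(s: str, chars: str, vals: List[int]) -> int:
--     subArr = 0
--     subMax = 0
--
--     hm = {}
--
--     for i in range(len(chars)):
--         hm[chars[i]] = vals[i]
--
--     for c in s:
--         if c in chars:
--             subArr = max(hm[c], subArr + hm[c])
--         else:
--             subArr = max(ord(c) - ord('a') + 1, subArr + ord(c) - ord('a') + 1)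
--         subMax = max(subMax, subArr)
--
--     return subMax
-- ===== SOURCE B (Python) =====
-- from typing import List
--
-- def maximumCostSubstring(s: str, chars: str, vals: List[int]) -> int:
--     # Prefix-sum formulation: best substring cost = max over i of prefix[i] - min prefix before i.
--     cost = dict(zip(chars, vals))
--     run = 0
--     minPrefix = 0
--     ans = 0
--     for c in s:
--         run += cost.get(c, ord(c) - ord('a') + 1)
--         if run - minPrefix > ans:
--             ans = run - minPrefix
--         if run < minPrefix:
--             minPrefix = run
--     return ans
-- ===== Notes on version B (the rewrite author's own statement) =====
-- stated objective: faster
-- what changed: Replaces Kadane's current-best recurrence with a running prefix sum minus the minimum prefix seen so far, and replaces the per-character 'c in chars' substring scan plus index-loop dict build with a single dict(zip(chars, vals)) lookup via .get with a default.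
import Mathlib
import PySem

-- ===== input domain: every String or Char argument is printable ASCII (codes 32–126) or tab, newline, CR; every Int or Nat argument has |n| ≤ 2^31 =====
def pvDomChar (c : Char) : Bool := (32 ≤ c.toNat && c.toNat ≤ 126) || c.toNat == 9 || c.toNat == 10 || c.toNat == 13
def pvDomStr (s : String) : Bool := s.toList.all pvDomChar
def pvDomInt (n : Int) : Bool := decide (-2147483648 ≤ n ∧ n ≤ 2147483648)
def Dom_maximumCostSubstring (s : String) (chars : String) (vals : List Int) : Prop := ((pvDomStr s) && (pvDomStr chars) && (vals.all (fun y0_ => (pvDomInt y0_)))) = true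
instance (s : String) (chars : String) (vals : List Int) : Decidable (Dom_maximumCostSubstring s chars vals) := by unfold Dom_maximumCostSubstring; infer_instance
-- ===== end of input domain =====

-- B replaces Kadane's current-best recurrence with a running prefix sum minus the minimum
-- prefix seen so far (same cost rule via a dict built by dict(zip(chars, vals))); alternative
-- decomposition, same asymptotic cost.

-- ===== PORT A =====
-- 'c in chars' on a single character is character membership; vals[i]/chars[i] are ported
-- with pyGetD, exact under Pre_ (indices of range(len(chars)) are in range for both lists).
def maximumCostSubstring (s : String) (chars : String) (vals : List Int) : Int :=
  let hm : PySem.Dict Char Int :=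
    (PySem.List.pyRange 0 (PySem.Str.len chars) 1).foldl
      (fun hm i => hm.insert (PySem.List.pyGetD chars.toList i ' ') (PySem.List.pyGetD vals i 0))
      PySem.Dict.empty
  let st := s.toList.foldl
    (fun (st : Int × Int) c =>
      let subArr :=
        if chars.toList.contains c then
          max (hm.getD c 0) (st.1 + hm.getD c 0)
        else
          max ((c.toNat : Int) - ('a'.toNat : Int) + 1) (st.1 + (c.toNat : Int) - ('a'.toNat : Int) + 1)
      (subArr, max st.2 subArr))
    (0, 0)
  st.2

-- ===== PORT B =====
def maximumCostSubstring_alt (s : String) (chars : String) (vals : List Int) : Int :=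
  let cost : PySem.Dict Char Int := PySem.Dict.ofList (chars.toList.zip vals)
  let st := s.toList.foldl
    (fun (st : Int × Int × Int) c =>
      let run := st.1 + cost.getD c ((c.toNat : Int) - ('a'.toNat : Int) + 1)
      let ans := if st.2.2 < run - st.2.1 then run - st.2.1 else st.2.2
      let mp := if run < st.2.1 then run else st.2.1
      (run, mp, ans))
    (0, 0, 0)
  st.2.2

-- ===== PRECONDITION & SPEC =====
-- A indexes vals[i] for every i < len(chars), raising IndexError when vals is shorter.
def Pre_maximumCostSubstring (s : String) (chars : String) (vals : List Int) : Prop :=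
  chars.toList.length ≤ vals.length
instance (s : String) (chars : String) (vals : List Int) : Decidable (Pre_maximumCostSubstring s chars vals) := by unfold Pre_maximumCostSubstring; infer_instance
def pvWitness_maximumCostSubstring : String × String × List Int := ("abx!", "ab", [3, -2])

def Spec_maximumCostSubstring (s : String) (chars : String) (vals : List Int) (out : Int) : Prop := out = maximumCostSubstring_alt s chars vals
instance (s : String) (chars : String) (vals : List Int) (out : Int) : Decidable (Spec_maximumCostSubstring s chars vals out) := by unfold Spec_maximumCostSubstring; infer_instance

-- ===== CLAIM (what is proved, stated in full; the proofs are below) =====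
def Claim_equal_maximumCostSubstring : Prop := ∀ (s : String) (chars : String) (vals : List Int), Dom_maximumCostSubstring s chars vals → Pre_maximumCostSubstring s chars vals → Spec_maximumCostSubstring s chars vals (maximumCostSubstring s chars vals)

-- ===== LEMMAS AND PROOFS =====

-- A's index loop builds exactly the pair list zip(chars, vals) when vals is long enough.
lemma pairs_eq (cl : List Char) (vals : List Int) (h : cl.length ≤ vals.length) :
    (PySem.List.pyRange 0 (cl.length : Int) 1).map
      (fun i => ((PySem.List.pyGetD cl i ' ', PySem.List.pyGetD vals i 0) : Char × Int))
    = cl.zip vals := by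
  apply List.ext_getElem
  · simp [PySem.List.length_pyRange_one]
    omega
  · intro k h1 h2
    have hk : k < cl.length := by
      simpa [PySem.List.length_pyRange_one] using h1
    simp [PySem.List.getElem_pyRange_one, PySem.List.pyGetD_natCast,
      List.getD_eq_getElem?_getD, List.getElem?_eq_getElem hk,
      List.getElem?_eq_getElem (show k < vals.length by omega)]

lemma get?_foldl_insert_of_not_mem {κ ν : Type} [BEq κ] [LawfulBEq κ]
    (l : List (κ × ν)) (acc : PySem.Dict κ ν) (c : κ) (h : ∀ p ∈ l, p.1 ≠ c) :
    (l.foldl (fun d kv => d.insert kv.1 kv.2) acc).get? c = acc.get? c := by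
  induction l generalizing acc with
  | nil => rfl
  | cons p l ih =>
    rw [List.foldl_cons, ih _ (fun q hq => h q (List.mem_cons_of_mem _ hq)),
      PySem.Dict.get?_insert_of_ne acc p.2 (Ne.symm (h p List.mem_cons_self))]

lemma get?_foldl_insert_isSome {κ ν : Type} [BEq κ] [LawfulBEq κ]
    (l : List (κ × ν)) (acc : PySem.Dict κ ν) (c : κ) (h : c ∈ l.map Prod.fst) :
    ((l.foldl (fun d kv => d.insert kv.1 kv.2) acc).get? c).isSome := by
  induction l generalizing acc with
  | nil => simp at h
  | cons p l ih =>
    rw [List.foldl_cons]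
    by_cases hc : c ∈ l.map Prod.fst
    · exact ih _ hc
    · have hpc : p.1 = c := by
        rcases List.mem_cons.mp h with h1 | h1
        · exact h1.symm
        · exact absurd h1 hc
      have hne : ∀ q ∈ l, q.1 ≠ c := by
        intro q hq hqe; exact hc (List.mem_map.mpr ⟨q, hq, hqe⟩)
      rw [get?_foldl_insert_of_not_mem _ _ _ hne, ← hpc, PySem.Dict.get?_insert_self]
      rfl

-- present key: getD is independent of the default
lemma getD_foldl_insert_of_mem {κ ν : Type} [BEq κ] [LawfulBEq κ]
    (l : List (κ × ν)) (c : κ) (h : c ∈ l.map Prod.fst) (d d' : ν) :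
    (l.foldl (fun d kv => d.insert kv.1 kv.2) PySem.Dict.empty).getD c d
    = (l.foldl (fun d kv => d.insert kv.1 kv.2) PySem.Dict.empty).getD c d' := by
  have := get?_foldl_insert_isSome l PySem.Dict.empty c h
  unfold PySem.Dict.getD
  rcases Option.isSome_iff_exists.mp this with ⟨v, hv⟩
  rw [hv]; rfl

-- absent key: getD returns the default
lemma getD_foldl_insert_of_not_mem {κ ν : Type} [BEq κ] [LawfulBEq κ]
    (l : List (κ × ν)) (c : κ) (h : c ∉ l.map Prod.fst) (d : ν) :
    (l.foldl (fun d kv => d.insert kv.1 kv.2) PySem.Dict.empty).getD c d = d := by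
  unfold PySem.Dict.getD
  rw [get?_foldl_insert_of_not_mem _ _ _ (fun q hq hqe => h (List.mem_map.mpr ⟨q, hq, hqe⟩))]
  rfl

-- Kadane's loop (A) and the prefix-sum/min-prefix loop (B) agree, given one shared cost f.
lemma kadane_eq_prefix (f : Char → Int) (l : List Char)
    (subArr subMax run mp ans : Int) (h1 : ans = subMax) (h2 : run - mp = max subArr 0) :
    (l.foldl (fun (st : Int × Int) c =>
        let sA := max (f c) (st.1 + f c); (sA, max st.2 sA)) (subArr, subMax)).2
    = (l.foldl (fun (st : Int × Int × Int) c =>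
        let r := st.1 + f c;
        let a := if st.2.2 < r - st.2.1 then r - st.2.1 else st.2.2;
        let m := if r < st.2.1 then r else st.2.1;
        (r, m, a)) (run, mp, ans)).2.2 := by
  induction l generalizing subArr subMax run mp ans with
  | nil => simpa using h1.symm
  | cons c l ih =>
    simp only [List.foldl_cons]
    apply ih
    · have hsA : run + f c - mp = max (f c) (subArr + f c) := by omega
      rw [hsA] at *
      omega
    · have hsA : run + f c - mp = max (f c) (subArr + f c) := by omega
      split_ifs with hm
      · omega
      · omega

-- the two ports agree
lemma ports_agree (s chars : String) (vals : List Int)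
    (h : chars.toList.length ≤ vals.length) :
    maximumCostSubstring s chars vals = maximumCostSubstring_alt s chars vals := by
  unfold maximumCostSubstring maximumCostSubstring_alt PySem.Dict.ofList PySem.Dict.update
  rw [PySem.Str.len_eq]
  have hfold :
      (PySem.List.pyRange 0 (chars.toList.length : Int) 1).foldl
        (fun hm i => hm.insert (PySem.List.pyGetD chars.toList i ' ') (PySem.List.pyGetD vals i 0))
        PySem.Dict.empty
      = (chars.toList.zip vals).foldl (fun d kv => d.insert kv.1 kv.2) PySem.Dict.empty := by
    rw [← pairs_eq chars.toList vals h, List.foldl_map]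
  rw [hfold]
  set D := (chars.toList.zip vals).foldl (fun d kv => d.insert kv.1 kv.2) PySem.Dict.empty with hD
  have hkeys : (chars.toList.zip vals).map Prod.fst = chars.toList := by
    exact List.map_fst_zip h
  -- both steps compute with the single cost function f
  set f : Char → Int := fun c => D.getD c ((c.toNat : Int) - ('a'.toNat : Int) + 1) with hf
  have hstep : ∀ (st : Int × Int) (c : Char),
      (let subArr :=
        if chars.toList.contains c then
          max (D.getD c 0) (st.1 + D.getD c 0)
        else
          max ((c.toNat : Int) - ('a'.toNat : Int) + 1) (st.1 + (c.toNat : Int) - ('a'.toNat : Int) + 1)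
       ((subArr, max st.2 subArr) : Int × Int))
      = (let sA := max (f c) (st.1 + f c); (sA, max st.2 sA)) := by
    intro st c
    by_cases hc : c ∈ chars.toList
    · have hmem : c ∈ (chars.toList.zip vals).map Prod.fst := by rw [hkeys]; exact hc
      have hfc : D.getD c 0 = f c := getD_foldl_insert_of_mem _ c hmem 0 _
      simp only [List.contains_eq_mem, hc, decide_true, if_true, hfc]
    · have hmem : c ∉ (chars.toList.zip vals).map Prod.fst := by rw [hkeys]; exact hc
      have hfc : f c = (c.toNat : Int) - ('a'.toNat : Int) + 1 :=
        getD_foldl_insert_of_not_mem _ c hmem _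
      simp [List.contains_eq_mem, hc, hfc]
      omega
  have hA : (s.toList.foldl
      (fun (st : Int × Int) c =>
        let subArr :=
          if chars.toList.contains c then
            max (D.getD c 0) (st.1 + D.getD c 0)
          else
            max ((c.toNat : Int) - ('a'.toNat : Int) + 1) (st.1 + (c.toNat : Int) - ('a'.toNat : Int) + 1)
        (subArr, max st.2 subArr)) (0, 0))
      = (s.toList.foldl (fun (st : Int × Int) c =>
          let sA := max (f c) (st.1 + f c); (sA, max st.2 sA)) (0, 0)) := by
    exact PySem.List.foldl_congr_mem _ _ _ _ (fun st c _ => hstep st c)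
  simp only [hA]
  exact kadane_eq_prefix f s.toList 0 0 0 0 0 rfl (by omega)

-- ===== VERDICT (by name: the statement is the Claim_ definition above) =====
theorem maximumCostSubstring_spec : Claim_equal_maximumCostSubstring := by
  intro s chars vals _ hpre
  unfold Spec_maximumCostSubstring
  exact ports_agree s chars vals hpre
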